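-- pv_equiv track=rewrite | github.com/Azlou77/python-project | corpus2.py | count_words_in_common
-- ===== SOURCE A (Python) =====
-- def count_words_in_common(texts):
--     # Initialize counter
--     counter = 0
--     # Split text1 into list of words
--     words1 = texts[0].split()
--     # Split text2 into list of words
--     words2 = texts[1].split()
--     # Loop over words1
--     for word1 in words1:
--         # Loop over words2
--         for word2 in words2:
--             # Check if words are identical
--             if word1 == word2:
--                 # Increment counter
--                 counter += 1
--     # Return counter
--     return counter
-- ===== SOURCE B (Python) =====
-- def count_words_in_common(texts):
--     counts2 = {}
--     for w in texts[1].split():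
--         counts2[w] = counts2.get(w, 0) + 1
--     return sum(counts2.get(w, 0) for w in texts[0].split())
-- ===== Notes on version B (the rewrite author's own statement) =====
-- stated objective: alternative
-- what changed: Replaces the nested scan over both word lists with a one-pass dict of word counts for text 2, then a single pass over text 1 summing those counts.
import Mathlib
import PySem

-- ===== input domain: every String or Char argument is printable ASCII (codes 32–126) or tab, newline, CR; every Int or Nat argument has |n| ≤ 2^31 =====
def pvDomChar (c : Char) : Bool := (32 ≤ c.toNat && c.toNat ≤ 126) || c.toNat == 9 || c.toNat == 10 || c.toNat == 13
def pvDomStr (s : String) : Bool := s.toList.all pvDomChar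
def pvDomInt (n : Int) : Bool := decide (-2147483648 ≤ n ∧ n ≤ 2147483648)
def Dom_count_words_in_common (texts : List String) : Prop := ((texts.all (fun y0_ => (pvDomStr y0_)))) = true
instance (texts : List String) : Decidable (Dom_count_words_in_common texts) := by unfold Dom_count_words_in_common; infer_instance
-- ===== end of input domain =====

-- B replaces A's nested scan with a dict of word counts for text 2 plus one summing pass over text 1 (alternative algorithm).


-- ===== PORT A =====
def count_words_in_common (texts : List String) : Int :=
  match PySem.List.pyGet? texts 0 with
  | none => 0   -- IndexError in Python; excluded by Pre_
  | some t0 =>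
    match PySem.List.pyGet? texts 1 with
    | none => 0   -- IndexError in Python; excluded by Pre_
    | some t1 =>
      let words1 := PySem.Str.split₀ t0
      let words2 := PySem.Str.split₀ t1
      words1.foldl (fun counter word1 =>
        words2.foldl (fun counter word2 =>
          if word1 == word2 then counter + 1 else counter) counter) 0

-- ===== PORT B =====
def count_words_in_common_alt (texts : List String) : Int :=
  match PySem.List.pyGet? texts 0, PySem.List.pyGet? texts 1 with
  | some t0, some t1 =>
    let counts2 := (PySem.Str.split₀ t1).foldl
      (fun d w => d.insert w (d.getD w 0 + 1)) PySem.Dict.empty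
    (PySem.Str.split₀ t0).foldl (fun acc w => acc + counts2.getD w 0) 0
  | _, _ => 0   -- IndexError in Python; excluded by Pre_

-- ===== PRECONDITION & SPEC =====
-- A indexes texts[0] and texts[1]: fewer than two texts raise IndexError.
def Pre_count_words_in_common (texts : List String) : Prop := 2 ≤ texts.length
instance (texts : List String) : Decidable (Pre_count_words_in_common texts) := by
  unfold Pre_count_words_in_common; infer_instance
def pvWitness_count_words_in_common : List String := ["a bb a", "bb a c"]
def Spec_count_words_in_common (texts : List String) (out : Int) : Prop := out = count_words_in_common_alt texts
instance (texts : List String) (out : Int) : Decidable (Spec_count_words_in_common texts out) := by unfold Spec_count_words_in_common; infer_instance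

-- ===== CLAIM (what is proved, stated in full; the proofs are below) =====
def Claim_equal_count_words_in_common : Prop := ∀ (texts : List String), Dom_count_words_in_common texts → Pre_count_words_in_common texts → Spec_count_words_in_common texts (count_words_in_common texts)

-- ===== LEMMAS AND PROOFS =====

-- countP with the test written as 'w = x' equals countP with 'x == w'.
theorem countP_flip (w : String) (l : List String) :
    List.countP (fun x => decide (w = x)) l = List.countP (fun x => x == w) l :=
  List.countP_congr (fun x _ => by
    constructor
    · intro h; exact beq_iff_eq.mpr (of_decide_eq_true h).symm
    · intro h; exact decide_eq_true (beq_iff_eq.mp h).symm)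

-- Both programs compute Σ_{w ∈ words1} count(w, words2): A's inner loop by scanning,
-- B's by a counting dict for words2.
theorem both_sides_sum (ws1 ws2 : List String) :
    ws1.foldl (fun counter word1 =>
      ws2.foldl (fun counter word2 =>
        if word1 = word2 then counter + 1 else counter) counter) (0 : Int)
    = ws1.foldl (fun acc w =>
        acc + (ws2.foldl (fun d x => d.insert x (d.getD x 0 + 1))
                PySem.Dict.empty).getD w 0) (0 : Int) := by
  apply PySem.List.foldl_congr_mem
  intro acc w _
  rw [PySem.List.foldl_ite_add_one (fun word2 => w = word2),
      PySem.Dict.getD_foldl_insert_add_one]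
  simp [PySem.Dict.getD, PySem.Dict.get?, PySem.Dict.empty, List.count, countP_flip]

-- ===== VERDICT (by name: the statement is the Claim_ definition above) =====
theorem count_words_in_common_spec : Claim_equal_count_words_in_common := by
  intro texts _ _
  unfold Spec_count_words_in_common count_words_in_common count_words_in_common_alt
  cases h0 : PySem.List.pyGet? texts 0 <;> cases h1 : PySem.List.pyGet? texts 1 <;> simp <;>
    first | rfl | exact both_sides_sum _ _
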